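-- pv_equiv track=rewrite | github.com/samelat/OPaC | opac/opac_regex.py | fragment
-- ===== SOURCE A (Python) =====
-- def fragment(template):
--     fragmented_template = []
--     sizes = []
--
--     last_group = template.pop(0)
--     while template:
--         group = template.pop(0)
--
--         intersection_size = 0
--         for size in range(1, min(len(last_group), len(group)) + 1):
--             if last_group[-1*size:] == group[:size]:
--                 intersection_size = size
--                 break
--
--         if intersection_size:
--             fragments = [last_group[:-1*intersection_size],
--                          last_group[ -1*intersection_size:],
--                          group[:intersection_size],
--                          group[intersection_size:]]
--             fragments = [group for group in fragments if group]
--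
--             last_group = fragments.pop()
--             fragmented_template.extend(fragments)
--
--         else:
--             fragmented_template.append(last_group)
--             last_group = group
--
--     fragmented_template.append(last_group)
--     return fragmented_template
-- ===== SOURCE B (Python) =====
-- def _smallest_overlap(a, b):
--     # smallest k >= 1 with a[-k:] == b[:k], via the KMP prefix function of b + "\0" + a
--     s = b + "\0" + a
--     n = len(s)
--     pi = [0]
--     for i in range(1, n):
--         k = pi[i - 1]
--         while k and s[i] != s[k]:
--             k = pi[k - 1]
--         if s[i] == s[k]:
--             k += 1
--         pi.append(k)
--     k = pi[n - 1]
--     res = 0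
--     while k:
--         res = k
--         k = pi[k - 1]
--     return res
--
--
-- def fragment(template):
--     out = []
--     last = template[0]
--     for group in template[1:]:
--         k = _smallest_overlap(last, group)
--         if k == 0:
--             out.append(last)
--             last = group
--         else:
--             head = last[:len(last) - k]
--             ov = last[len(last) - k:]
--             tail = group[k:]
--             if head:
--                 out.append(head)
--             out.append(ov)
--             if tail:
--                 out.append(ov)
--                 last = tail
--             else:
--                 last = ov
--     out.append(last)
--     return out
-- ===== Notes on version B (the rewrite author's own statement) =====
-- stated objective: faster
-- what changed: The smallest suffix-prefix overlap between adjacent groups is computed with the KMP prefix function of group+'\0'+last (its smallest positive border, found in linear time) instead of testing every cut size with quadratic slice comparisons, and the splitting emits the pieces directly in one non-mutating pass instead of building, filtering and popping a fragment list from a consumed input list.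
import Mathlib
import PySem

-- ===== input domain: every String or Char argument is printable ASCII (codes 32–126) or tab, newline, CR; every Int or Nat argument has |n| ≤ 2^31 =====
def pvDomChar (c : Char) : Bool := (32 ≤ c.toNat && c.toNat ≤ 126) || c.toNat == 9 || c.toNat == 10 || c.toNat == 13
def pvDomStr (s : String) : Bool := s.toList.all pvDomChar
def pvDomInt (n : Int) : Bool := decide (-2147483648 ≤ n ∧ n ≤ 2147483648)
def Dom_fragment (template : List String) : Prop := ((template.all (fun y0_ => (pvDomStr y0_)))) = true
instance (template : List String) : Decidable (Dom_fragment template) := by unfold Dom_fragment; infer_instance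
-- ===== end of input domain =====

-- B computes the smallest suffix-prefix overlap with the KMP prefix function of group+'\0'+last
-- (its smallest positive border) instead of testing every cut size by slice comparison, and emits
-- the split pieces directly in one non-mutating pass (A consumes its argument with pop(0); the
-- equivalence proved here is about the return value only — B does not mutate its argument).

-- ===== PORT A =====
-- 'for size in range(1, min(len(last),len(group))+1): if last[-1*size:] == group[:size]: …; break'
def ovA (a b : String) : List Int → Int
  | [] => 0
  | sz :: rest =>
    if PySem.Str.slice a (some (-1 * sz)) none = PySem.Str.slice b none (some sz)
    then sz
    else ovA a b rest

def ovAfull (a b : String) : Int :=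
  ovA a b (PySem.List.pyRange 1 (min (PySem.Str.len a) (PySem.Str.len b) + 1) 1)

def fragStepA (st : List String × String) (group : String) : List String × String :=
  let isz := ovAfull st.2 group
  if isz ≠ 0 then
    let fragments := [PySem.Str.slice st.2 none (some (-1 * isz)),
                      PySem.Str.slice st.2 (some (-1 * isz)) none,
                      PySem.Str.slice group none (some isz),
                      PySem.Str.slice group (some isz) none]
    let fragments := fragments.filter (fun g => g ≠ "")
    match PySem.List.pop? fragments (-1) with
    | some (last, rest) => (st.1 ++ rest, last)
    | none => (st.1, st.2)  -- unreachable: fragments always holds the nonempty overlap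
  else (st.1 ++ [st.2], group)

def fragment (template : List String) : List String :=
  match template with
  | [] => []  -- Python raises IndexError on template.pop(0); excluded by Pre_fragment
  | g0 :: rest =>
    let r := rest.foldl fragStepA ([], g0)
    r.1 ++ [r.2]

-- ===== PORT B =====
-- 'while k and s[i] != s[k]: k = pi[k-1]' (fuel is a totality guard only; it never runs out)
def piDescend (s : List Char) (pi : List Nat) (i : Nat) : Nat → Nat → Nat
  | k, 0 => k
  | k, fuel+1 =>
    if k ≠ 0 ∧ s.getD i ' ' ≠ s.getD k ' ' then piDescend s pi i (pi.getD (k-1) 0) fuel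
    else k

-- body of 'for i in range(1, n): … pi.append(k)'
def piStep (s : List Char) (pi : List Nat) (i : Nat) : List Nat :=
  let k := piDescend s pi i (pi.getD (i-1) 0) i
  pi ++ [if s.getD i ' ' = s.getD k ' ' then k + 1 else k]

def buildPi (s : List Char) : List Nat :=
  (List.range' 1 (s.length - 1)).foldl (piStep s) [0]

-- 'while k: res = k; k = pi[k-1]'  (fuel is a totality guard only)
def chainMin (pi : List Nat) : Nat → Nat → Nat → Nat
  | _, res, 0 => res
  | k, res, fuel+1 => if k = 0 then res else chainMin pi (pi.getD (k-1) 0) k fuel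

-- s = b + "\0" + a as its list of code points (python string concatenation/indexing, exact)
def smallestOverlap (a b : List Char) : Nat :=
  let s := b ++ '\x00' :: a
  let pi := buildPi s
  chainMin pi (pi.getD (s.length - 1) 0) 0 s.length

def fragStepB (st : List String × String) (group : String) : List String × String :=
  let k := smallestOverlap st.2.toList group.toList
  if k = 0 then (st.1 ++ [st.2], group)
  else
    let head := PySem.Str.slice st.2 none (some ((PySem.Str.len st.2) - (k : Int)))
    let ov := PySem.Str.slice st.2 (some ((PySem.Str.len st.2) - (k : Int))) none
    let tail := PySem.Str.slice group (some (k : Int)) none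
    let out := if head ≠ "" then st.1 ++ [head] else st.1
    let out := out ++ [ov]
    if tail ≠ "" then (out ++ [ov], tail) else (out, ov)

def fragment_alt (template : List String) : List String :=
  match template with
  | [] => []  -- Python raises IndexError on template[0]; excluded by Pre_fragment
  | g0 :: rest =>
    let r := rest.foldl fragStepB ([], g0)
    r.1 ++ [r.2]

-- ===== PRECONDITION & SPEC =====
-- Python A raises IndexError on the empty list (template.pop(0)); that is the only excluded input.
def Pre_fragment (template : List String) : Prop := template ≠ []
instance (template : List String) : Decidable (Pre_fragment template) := by
  unfold Pre_fragment; infer_instance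

def pvWitness_fragment : List String := (["abc", "cd"])

def Spec_fragment (template : List String) (out : List String) : Prop := out = fragment_alt template
instance (template : List String) (out : List String) : Decidable (Spec_fragment template out) := by
  unfold Spec_fragment; infer_instance

-- ===== CLAIM (what is proved, stated in full; the proofs are below) =====
def Claim_equal_fragment : Prop :=
  ∀ (template : List String), Dom_fragment template → Pre_fragment template →
    Spec_fragment template (fragment template)

-- ===== LEMMAS AND PROOFS =====

lemma pvGetD_append_left {α : Type} (l l' : List α) (n : Nat) (d : α) (h : n < l.length) :
    (l ++ l').getD n d = l.getD n d := by
  simp [List.getD, List.getElem?_append_left h]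

lemma pvGetD_append_right {α : Type} (l l' : List α) (n : Nat) (d : α) (h : l.length ≤ n) :
    (l ++ l').getD n d = l'.getD (n - l.length) d := by
  simp [List.getD, List.getElem?_append_right h]

lemma pvGetD_snoc' {α : Type} (l : List α) (x d : α) (n : Nat) (h : n = l.length) :
    (l ++ [x]).getD n d = x := by
  subst h; simp [List.getD]

-- ---- borders, stated pointwise on code points (getD) so that index reasoning is pure omega ----

-- 'bord s i k' : k is a proper border of the length-i prefix of s
def bord (s : List Char) (i k : Nat) : Bool :=
  decide (k < i) && decide (∀ j, j < k → s.getD j ' ' = s.getD (i - k + j) ' ')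

lemma bord_iff {s : List Char} {i k : Nat} :
    bord s i k = true ↔ (k < i ∧ ∀ j, j < k → s.getD j ' ' = s.getD (i - k + j) ' ') := by
  simp [bord]

lemma bord_zero {s : List Char} {i : Nat} (h : 1 ≤ i) : bord s i 0 = true :=
  bord_iff.mpr ⟨h, fun j hj => absurd hj (by omega)⟩

lemma bord_trans {s : List Char} {i k k' : Nat}
    (h1 : bord s i k = true) (h2 : bord s k k' = true) : bord s i k' = true := by
  rw [bord_iff] at h1 h2 ⊢
  obtain ⟨hk, H1⟩ := h1
  obtain ⟨hk', H2⟩ := h2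
  refine ⟨by omega, fun j hj => ?_⟩
  rw [H2 j hj]
  have h3 := H1 (k - k' + j) (by omega)
  rw [show i - k + (k - k' + j) = i - k' + j by omega] at h3
  exact h3

lemma bord_of_lt {s : List Char} {i k k' : Nat}
    (h1 : bord s i k = true) (h2 : bord s i k' = true) (hlt : k' < k) : bord s k k' = true := by
  rw [bord_iff] at h1 h2 ⊢
  obtain ⟨hk, H1⟩ := h1
  obtain ⟨hk', H2⟩ := h2
  refine ⟨hlt, fun j hj => ?_⟩
  rw [H2 j hj]
  have h3 := H1 (k - k' + j) (by omega)
  rw [show i - k + (k - k' + j) = i - k' + j by omega] at h3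
  exact h3.symm

lemma bord_succ {s : List Char} {i k : Nat} :
    bord s (i+1) (k+1) = true ↔ (bord s i k = true ∧ s.getD k ' ' = s.getD i ' ') := by
  simp only [bord_iff]
  constructor
  · rintro ⟨h1, h2⟩
    have hk : k < i := by omega
    refine ⟨⟨hk, fun j hj => ?_⟩, ?_⟩
    · have h3 := h2 j (by omega)
      rwa [show i + 1 - (k + 1) + j = i - k + j by omega] at h3
    · have h3 := h2 k (by omega)
      rwa [show i + 1 - (k + 1) + k = i by omega] at h3
  · rintro ⟨⟨h1, h2⟩, h3⟩
    refine ⟨by omega, fun j hj => ?_⟩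
    rw [show i + 1 - (k + 1) + j = i - k + j by omega]
    by_cases hje : j = k
    · subst hje; rw [show i - j + j = i by omega]; exact h3
    · exact h2 j (by omega)

-- the longest proper border of the length-i prefix
def maxB (s : List Char) (i : Nat) : Nat :=
  Nat.findGreatest (fun k => bord s i k = true) (i - 1)

lemma maxB_lt {s : List Char} {i : Nat} (h : 1 ≤ i) : maxB s i < i :=
  lt_of_le_of_lt (Nat.findGreatest_le _) (by omega)

lemma le_maxB {s : List Char} {i k : Nat} (hb : bord s i k = true) : k ≤ maxB s i :=
  Nat.le_findGreatest (by have := (bord_iff.mp hb).1; omega) hb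

lemma maxB_bord {s : List Char} {i : Nat} (h : 1 ≤ i) : bord s i (maxB s i) = true := by
  by_cases h0 : maxB s i = 0
  · rw [h0]; exact bord_zero h
  · exact (Nat.findGreatest_eq_iff.mp (rfl : maxB s i = maxB s i)).2.1 h0

-- ---- correctness of the descent loop ----

lemma piDescend_spec (s : List Char) (pi : List Nat) (i : Nat) (hi : 1 ≤ i)
    (hpi : ∀ j, j < i → pi.getD j 0 = maxB s (j+1)) :
    ∀ fuel k, k ≤ fuel →
      (k = 0 ∨ bord s i k = true) →
      (∀ k', bord s i k' = true → k < k' → s.getD k' ' ' ≠ s.getD i ' ') →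
      (piDescend s pi i k fuel = 0 ∨
        (bord s i (piDescend s pi i k fuel) = true ∧
         s.getD (piDescend s pi i k fuel) ' ' = s.getD i ' ')) ∧
      (∀ k', bord s i k' = true → piDescend s pi i k fuel < k' →
         s.getD k' ' ' ≠ s.getD i ' ') := by
  intro fuel
  induction fuel with
  | zero =>
    intro k hk hd hno
    have hk0 : k = 0 := by omega
    subst hk0
    exact ⟨Or.inl rfl, hno⟩
  | succ f ih =>
    intro k hk hd hno
    simp only [piDescend]
    by_cases hc : k ≠ 0 ∧ s.getD i ' ' ≠ s.getD k ' '
    · rw [if_pos hc]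
      have hb : bord s i k = true := by
        rcases hd with h | h
        · exact absurd h hc.1
        · exact h
      have hklt : k < i := (bord_iff.mp hb).1
      have hget : pi.getD (k-1) 0 = maxB s k := by
        rw [hpi (k-1) (by omega), show k - 1 + 1 = k by omega]
      have hle : maxB s k ≤ k - 1 := Nat.findGreatest_le _
      rw [hget]
      apply ih (maxB s k) (by omega)
      · by_cases h0 : maxB s k = 0
        · exact Or.inl h0
        · exact Or.inr (bord_trans hb (maxB_bord (by omega)))
      · intro k' hb' hgt
        rcases lt_trichotomy k' k with h | h | h
        · -- maxB s k < k' < k : k' would be a proper border of the k-prefix above its maximum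
          exfalso
          have := le_maxB (bord_of_lt hb hb' h)
          omega
        · subst h; exact fun e => hc.2 e.symm
        · exact hno k' hb' h
    · rw [if_neg hc]
      push_neg at hc
      constructor
      · by_cases h0 : k = 0
        · exact Or.inl h0
        · have hb : bord s i k = true := by
            rcases hd with h | h
            · exact absurd h h0
            · exact h
          exact Or.inr ⟨hb, (hc h0).symm⟩
      · exact hno

-- ---- the prefix-function array is correct ----

lemma buildPi_inv (s : List Char) :
    ∀ c, ((List.range' 1 c).foldl (piStep s) [0]).length = c + 1 ∧
      ∀ j, j < c + 1 → ((List.range' 1 c).foldl (piStep s) [0]).getD j 0 = maxB s (j+1) := by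
  intro c
  induction c with
  | zero =>
    refine ⟨rfl, fun j hj => ?_⟩
    have hj0 : j = 0 := by omega
    subst hj0
    have h1 : maxB s (0+1) = 0 := Nat.findGreatest_zero
    rw [h1]
    rfl
  | succ c ih =>
    obtain ⟨hlen, hent⟩ := ih
    set pi := (List.range' 1 c).foldl (piStep s) [0] with hpidef
    set i := c + 1 with hidef
    have hconc : List.range' 1 i = List.range' 1 c ++ [1 + 1 * c] :=
      List.range'_concat ..
    have hfold : (List.range' 1 i).foldl (piStep s) [0] = piStep s pi (c+1) := by
      rw [hconc, List.foldl_append]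
      simp only [List.foldl_cons, List.foldl_nil, ← hpidef]
      congr 1
      omega
    have hi : 1 ≤ i := by omega
    -- the descent starts from pi[i-1] = maxB s i
    have hstart : pi.getD (i-1) 0 = maxB s i := by
      rw [hent (i-1) (by omega), show i - 1 + 1 = i by omega]
    have hdesc := piDescend_spec s pi i hi (fun j hj => hent j (by omega)) i (pi.getD (i-1) 0)
      (by rw [hstart]; have := maxB_lt (s := s) hi; omega)
      (Or.inr (by rw [hstart]; exact maxB_bord hi))
      (by
        intro k' hb' hgt
        rw [hstart] at hgt
        have := le_maxB hb'
        omega)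
    set r := piDescend s pi i (pi.getD (i-1) 0) i with hrdef
    obtain ⟨hr1, hr2⟩ := hdesc
    have hnew : (if s.getD i ' ' = s.getD r ' ' then r + 1 else r) = maxB s (i+1) := by
      by_cases hm : s.getD i ' ' = s.getD r ' '
      · rw [if_pos hm]
        have hrb : bord s i r = true := by
          rcases hr1 with h | h
          · rw [h]; exact bord_zero hi
          · exact h.1
        have hrlt : r < i := (bord_iff.mp hrb).1
        symm
        apply Nat.findGreatest_eq_iff.mpr
        refine ⟨by omega, fun _ => bord_succ.mpr ⟨hrb, hm.symm⟩, ?_⟩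
        intro n hgt hle hbn
        match n, hgt with
        | m+1, hgt =>
          obtain ⟨hbm, hms⟩ := bord_succ.mp hbn
          exact hr2 m hbm (by omega) hms
      · rw [if_neg hm]
        have hr0 : r = 0 := by
          rcases hr1 with h | h
          · exact h
          · exact absurd h.2.symm hm
        rw [hr0]
        symm
        apply Nat.findGreatest_eq_iff.mpr
        refine ⟨by omega, fun h => absurd rfl h, ?_⟩
        intro n hgt hle hbn
        match n, hgt with
        | m+1, hgt =>
          obtain ⟨hbm, hms⟩ := bord_succ.mp hbn
          by_cases hm0 : m = 0
          · subst hm0; rw [hr0] at hm; exact hm hms.symm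
          · exact hr2 m hbm (by omega) hms
    rw [hfold]
    simp only [piStep]
    rw [show c + 1 = i from rfl, ← hrdef]
    constructor
    · simp only [List.length_append, List.length_cons, List.length_nil, hlen]
    · intro j hj
      by_cases hjl : j < i
      · rw [pvGetD_append_left _ _ _ _ (by omega)]
        exact hent j (by omega)
      · rw [show j = i by omega, pvGetD_snoc' _ _ _ _ hlen.symm]
        exact hnew

lemma buildPi_spec (s : List Char) : ∀ j, j < s.length → (buildPi s).getD j 0 = maxB s (j+1) := by
  intro j hj
  unfold buildPi
  exact (buildPi_inv s (s.length - 1)).2 j (by omega)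

-- ---- first satisfying element of st..st+c-1 ----

lemma find?_range'_first (p : Nat → Bool) :
    ∀ c st, ((List.range' st c).find? p = none ∧ ∀ j, st ≤ j → j < st + c → p j = false)
      ∨ ∃ k, (List.range' st c).find? p = some k ∧ st ≤ k ∧ k < st + c ∧ p k = true ∧
          ∀ j, st ≤ j → j < k → p j = false := by
  intro c
  induction c with
  | zero =>
    intro st
    exact Or.inl ⟨rfl, fun j h1 h2 => absurd h2 (by omega)⟩
  | succ c ih =>
    intro st
    rw [List.range'_succ]
    by_cases hst : p st = true
    · exact Or.inr ⟨st, by rw [List.find?_cons_of_pos hst], le_rfl, by omega, hst,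
        fun j h1 h2 => absurd h2 (by omega)⟩
    · have hst' : p st = false := by
        cases h : p st
        · rfl
        · exact absurd h hst
      rcases ih (st+1) with ⟨hn, hall⟩ | ⟨k, hf, hk1, hk2, hk3, hk4⟩
      · refine Or.inl ⟨by rw [List.find?_cons_of_neg (by simp [hst'])]; exact hn,
          fun j h1 h2 => ?_⟩
        by_cases hje : j = st
        · subst hje; exact hst'
        · exact hall j (by omega) (by omega)
      · refine Or.inr ⟨k, by rw [List.find?_cons_of_neg (by simp [hst'])]; exact hf,
          by omega, by omega, hk3, fun j h1 h2 => ?_⟩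
        by_cases hje : j = st
        · subst hje; exact hst'
        · exact hk4 j (by omega) h2

-- ---- the chain walk returns the smallest positive border ----

def minPB (s : List Char) : Nat :=
  ((List.range' 1 s.length).find? (fun k => bord s s.length k)).getD 0

lemma minPB_eq_of {s : List Char} {k : Nat} (hk : bord s s.length k = true) (hpos : 0 < k)
    (hmin : ∀ j, 0 < j → j < k → bord s s.length j = false) : minPB s = k := by
  have hklt : k < s.length := (bord_iff.mp hk).1
  unfold minPB
  rcases find?_range'_first (fun k => bord s s.length k) s.length 1 with
    ⟨hn, hall⟩ | ⟨k', hf, h1, h2, h3, h4⟩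
  · exact absurd hk (by rw [hall k hpos (by omega)]; simp)
  · rw [hf]
    rcases lt_trichotomy k' k with h | h | h
    · exact absurd h3 (by rw [hmin k' h1 h]; simp)
    · simpa using h
    · exact absurd hk (by rw [h4 k hpos h]; simp)

lemma minPB_eq_zero {s : List Char} (h : ∀ j, 0 < j → bord s s.length j = false) : minPB s = 0 := by
  unfold minPB
  rw [List.find?_eq_none.mpr]
  · rfl
  · intro x hx
    have hx' := List.mem_range'_1.mp hx
    rw [h x (by omega)]
    simp

lemma chainMin_spec (s : List Char) (pi : List Nat)
    (hpi : ∀ j, j < s.length → pi.getD j 0 = maxB s (j+1)) :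
    ∀ fuel k res, k + 1 ≤ fuel → bord s s.length k = true → 0 < k →
      chainMin pi k res fuel = minPB s := by
  intro fuel
  induction fuel with
  | zero => intro k res h; omega
  | succ f ih =>
    intro k res hfuel hb hpos
    have hklt : k < s.length := (bord_iff.mp hb).1
    simp only [chainMin]
    rw [if_neg (by omega)]
    have hget : pi.getD (k-1) 0 = maxB s k := by
      rw [hpi (k-1) (by omega), show k - 1 + 1 = k by omega]
    have hle : maxB s k ≤ k - 1 := Nat.findGreatest_le _
    rw [hget]
    by_cases h2 : maxB s k = 0
    · rw [h2]
      have hz : chainMin pi 0 k f = k := by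
        cases f <;> simp [chainMin]
      rw [hz]
      symm
      apply minPB_eq_of hb hpos
      intro j hj0 hjk
      cases hbj : bord s s.length j
      · rfl
      · exfalso
        have := le_maxB (bord_of_lt hb hbj hjk)
        omega
    · exact ih (maxB s k) k (by omega)
        (bord_trans hb (maxB_bord (by omega))) (by omega)

lemma smallestOverlap_eq_minPB (a b : List Char) :
    smallestOverlap a b = minPB (b ++ '\x00' :: a) := by
  simp only [smallestOverlap]
  set s := b ++ '\x00' :: a with hs
  have hlen : 1 ≤ s.length := by
    rw [hs]; simp only [List.length_append, List.length_cons]; omega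
  have hpi := buildPi_spec s
  have htop : (buildPi s).getD (s.length - 1) 0 = maxB s s.length := by
    rw [hpi _ (by omega), show s.length - 1 + 1 = s.length by omega]
  rw [htop]
  by_cases h0 : maxB s s.length = 0
  · rw [h0]
    have hz : chainMin (buildPi s) 0 0 s.length = 0 := by
      cases h : s.length <;> simp [chainMin]
    rw [hz]
    symm
    apply minPB_eq_zero
    intro j hj
    cases hbj : bord s s.length j
    · rfl
    · exfalso
      have := le_maxB hbj
      omega
  · exact chainMin_spec s (buildPi s) hpi s.length (maxB s s.length) 0
      (by have := maxB_lt (s := s) hlen; omega) (maxB_bord hlen) (by omega)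

-- ---- borders of b ++ '\0' ++ a are exactly the suffix-prefix overlaps ----

lemma pvGetD_mem {α : Type} (l : List α) (n : Nat) (d : α) (h : n < l.length) : l.getD n d ∈ l := by
  rw [List.getD_eq_getElem l d h]
  exact List.getElem_mem h

lemma bord_sep_iff (a b : List Char) (ha : '\x00' ∉ a) (hb : '\x00' ∉ b) (k : Nat) (hk : 0 < k) :
    bord (b ++ '\x00' :: a) (b ++ '\x00' :: a).length k = true ↔
      (k ≤ a.length ∧ k ≤ b.length ∧ a.drop (a.length - k) = b.take k) := by
  set s := b ++ '\x00' :: a with hs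
  have hn : s.length = b.length + a.length + 1 := by
    rw [hs]; simp only [List.length_append, List.length_cons]; omega
  have g1 : ∀ j, j < b.length → s.getD j ' ' = b.getD j ' ' := by
    intro j hj
    rw [hs, pvGetD_append_left _ _ _ _ hj]
  have g2 : s.getD b.length ' ' = '\x00' := by
    rw [hs, pvGetD_append_right _ _ _ _ le_rfl]
    simp
  have g3 : ∀ j, b.length + 1 ≤ j → s.getD j ' ' = a.getD (j - b.length - 1) ' ' := by
    intro j hj
    rw [hs, pvGetD_append_right _ _ _ _ (by omega)]
    rw [show j - b.length = (j - b.length - 1) + 1 by omega]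
    simp
  constructor
  · intro h
    obtain ⟨hklt, Hj⟩ := bord_iff.mp h
    have hkb : k ≤ b.length := by
      by_contra hcon
      push_neg at hcon
      have h1 := Hj b.length hcon
      rw [g2, g3 (s.length - k + b.length) (by omega)] at h1
      have hm : a.getD (s.length - k + b.length - b.length - 1) ' ' ∈ a :=
        pvGetD_mem _ _ _ (by omega)
      rw [← h1] at hm
      exact ha hm
    have hka : k ≤ a.length := by
      by_contra hcon
      push_neg at hcon
      have h1 := Hj (k - a.length - 1) (by omega)
      rw [show s.length - k + (k - a.length - 1) = b.length by omega, g2,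
          g1 _ (by omega)] at h1
      have hm : b.getD (k - a.length - 1) ' ' ∈ b := pvGetD_mem _ _ _ (by omega)
      rw [h1] at hm
      exact hb hm
    refine ⟨hka, hkb, ?_⟩
    apply List.ext_getElem
    · simp only [List.length_drop, List.length_take]; omega
    · intro j hj1 hj2
      have hjk : j < k := by simp only [List.length_drop] at hj1; omega
      rw [List.getElem_drop, List.getElem_take]
      have key : a.getD (a.length - k + j) ' ' = b.getD j ' ' := by
        have h1 := Hj j hjk
        rw [g1 j (by omega), g3 (s.length - k + j) (by omega),
            show s.length - k + j - b.length - 1 = a.length - k + j by omega] at h1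
        exact h1.symm
      exact ((List.getD_eq_getElem a ' ' (by omega)).symm.trans key).trans
        (List.getD_eq_getElem b ' ' (by omega))
  · rintro ⟨hka, hkb, heq⟩
    apply bord_iff.mpr
    refine ⟨by omega, fun j hj => ?_⟩
    rw [g1 j (by omega), g3 (s.length - k + j) (by omega),
        show s.length - k + j - b.length - 1 = a.length - k + j by omega]
    have h1 : a[a.length - k + j]'(by omega) = b[j]'(by omega) := by
      have h2 : (a.drop (a.length - k))[j]'(by simp only [List.length_drop]; omega) =
          (b.take k)[j]'(by simp only [List.length_take]; omega) :=
        List.getElem_of_eq heq _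
      rwa [List.getElem_drop, List.getElem_take] at h2
    exact ((List.getD_eq_getElem b ' ' (by omega)).trans h1.symm).trans
      (List.getD_eq_getElem a ' ' (by omega)).symm

-- ---- the first matching cut size: shared characterization of both ports ----

def ovFirst (al bl : List Char) : Nat :=
  ((List.range' 1 (min al.length bl.length)).find?
    (fun k => decide (al.drop (al.length - k) = bl.take k))).getD 0

lemma smallestOverlap_eq_ovFirst (a b : String)
    (ha : '\x00' ∉ a.toList) (hb : '\x00' ∉ b.toList) :
    smallestOverlap a.toList b.toList = ovFirst a.toList b.toList := by
  rw [smallestOverlap_eq_minPB]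
  set al := a.toList with hal
  set bl := b.toList with hbl
  unfold ovFirst
  rcases find?_range'_first (fun k => decide (al.drop (al.length - k) = bl.take k))
      (min al.length bl.length) 1 with ⟨hf, hall⟩ | ⟨k, hf, h1, h2, h3, h4⟩
  · rw [hf]
    apply minPB_eq_zero
    intro j hj
    cases hbj : bord (bl ++ '\x00' :: al) (bl ++ '\x00' :: al).length j
    · rfl
    · exfalso
      obtain ⟨hja, hjb, hjeq⟩ := (bord_sep_iff al bl ha hb j hj).mp hbj
      have h5 := hall j hj (by omega)
      simp only [decide_eq_false_iff_not] at h5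
      exact h5 hjeq
  · rw [hf]
    simp only [Option.getD_some]
    simp only [decide_eq_true_eq] at h3
    apply minPB_eq_of
    · exact (bord_sep_iff al bl ha hb k (by omega)).mpr ⟨by omega, by omega, h3⟩
    · omega
    · intro j hj0 hjk
      cases hbj : bord (bl ++ '\x00' :: al) (bl ++ '\x00' :: al).length j
      · rfl
      · exfalso
        obtain ⟨hja, hjb, hjeq⟩ := (bord_sep_iff al bl ha hb j hj0).mp hbj
        have h5 := h4 j hj0 hjk
        simp only [decide_eq_false_iff_not] at h5
        exact h5 hjeq

-- ---- A's scanning loop computes the same first cut size ----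

lemma pvStrLen_eq (x : String) : PySem.Str.len x = (x.toList.length : Int) := by
  simp [pysem]

lemma ovA_go (a b : String) :
    ∀ (c st : Nat), 1 ≤ st →
      ovA a b (PySem.List.pyRange (st : Int) ((st + c : Nat) : Int) 1) =
        ((((List.range' st c).find?
            (fun k => decide (a.toList.drop (a.toList.length - k) = b.toList.take k))).getD 0 : Nat) : Int) := by
  intro c
  induction c with
  | zero =>
    intro st hst
    rw [show ((st + 0 : Nat) : Int) = (st : Int) by push_cast; ring]
    rw [PySem.List.pyRange_one_eq_nil le_rfl]
    rfl
  | succ c ih =>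
    intro st hst
    rw [PySem.List.pyRange_one_cons (by push_cast; omega)]
    rw [List.range'_succ]
    simp only [ovA]
    have hcond : (PySem.Str.slice a (some (-1 * (st : Int))) none =
        PySem.Str.slice b none (some (st : Int))) ↔
        (a.toList.drop (a.toList.length - st) = b.toList.take st) := by
      rw [← String.toList_inj]
      rw [show (-1 * (st : Int)) = -(st : Int) by ring]
      simp only [PySem.Str.toList_slice, PySem.Chars.slice_eq_listSlice]
      rw [PySem.List.slice_from_neg_natCast _ _ (by omega), PySem.List.slice_to_natCast]
    by_cases hc : a.toList.drop (a.toList.length - st) = b.toList.take st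
    · rw [if_pos (hcond.mpr hc), List.find?_cons_of_pos (by simpa using hc)]
      simp
    · rw [if_neg (fun h => hc (hcond.mp h)),
          List.find?_cons_of_neg (by simpa using hc)]
      have h := ih (st + 1) (by omega)
      rw [show ((st + 1 + c : Nat) : Int) = ((st + (c + 1) : Nat) : Int) by push_cast; ring,
          show ((st + 1 : Nat) : Int) = (st : Int) + 1 by push_cast; ring] at h
      exact h

lemma ovA_eq (a b : String) :
    ovAfull a b = ((ovFirst a.toList b.toList : Nat) : Int) := by
  unfold ovAfull ovFirst
  have h := ovA_go a b (min a.toList.length b.toList.length) 1 le_rfl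
  rw [show ((1 + min a.toList.length b.toList.length : Nat) : Int) =
      (min (PySem.Str.len a) (PySem.Str.len b) + 1) by
    rw [pvStrLen_eq a, pvStrLen_eq b]; push_cast; ring] at h
  rw [show ((1 : Nat) : Int) = (1 : Int) by norm_num] at h
  exact h

-- ---- the two step functions agree ----

lemma ne_empty_iff_toList (g : String) : g ≠ "" ↔ g.toList ≠ [] := by
  rw [ne_eq, ne_eq, ← String.toList_inj]
  simp

lemma ovFirst_props {al bl : List Char} (h : ovFirst al bl ≠ 0) :
    1 ≤ ovFirst al bl ∧ ovFirst al bl ≤ al.length ∧ ovFirst al bl ≤ bl.length ∧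
      al.drop (al.length - ovFirst al bl) = bl.take (ovFirst al bl) := by
  unfold ovFirst at *
  rcases find?_range'_first (fun k => decide (al.drop (al.length - k) = bl.take k))
      (min al.length bl.length) 1 with ⟨hf, _⟩ | ⟨k, hf, h1, h2, h3, _⟩
  · rw [hf] at h ⊢
    exact absurd rfl h
  · rw [hf] at h ⊢
    simp only [Option.getD_some] at h ⊢
    simp only [decide_eq_true_eq] at h3
    exact ⟨h1, by omega, by omega, h3⟩

set_option maxHeartbeats 1000000 in
lemma fragStep_eq (out : List String) (lastg group : String)
    (hl : '\x00' ∉ lastg.toList) (hg : '\x00' ∉ group.toList) :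
    fragStepA (out, lastg) group = fragStepB (out, lastg) group ∧
      '\x00' ∉ (fragStepB (out, lastg) group).2.toList := by
  have hovA := ovA_eq lastg group
  have hovB := smallestOverlap_eq_ovFirst lastg group hl hg
  set k := ovFirst lastg.toList group.toList with hkdef
  by_cases hk0 : k = 0
  · rw [hk0] at hovA hovB
    constructor
    · simp only [fragStepA, fragStepB]
      rw [hovA, hovB]
      norm_num
    · simp only [fragStepB]
      rw [hovB]
      norm_num
      exact hg
  · obtain ⟨hk1, hka, hkb, heq⟩ := ovFirst_props (hkdef ▸ hk0)
    rw [← hkdef] at hka hkb heq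
    have hkz : ((k : Nat) : Int) ≠ 0 := by exact_mod_cast hk0
    -- the four slices
    set f1 := PySem.Str.slice lastg none (some (-1 * (k : Int))) with hf1
    set f2 := PySem.Str.slice lastg (some (-1 * (k : Int))) none with hf2
    set f3 := PySem.Str.slice group none (some ((k : Nat) : Int)) with hf3
    set f4 := PySem.Str.slice group (some ((k : Nat) : Int)) none with hf4
    have t1 : f1.toList = lastg.toList.take (lastg.toList.length - k) := by
      rw [hf1, show (-1 * (k : Int)) = -(k : Int) by ring]
      simp only [PySem.Str.toList_slice, PySem.Chars.slice_eq_listSlice]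
      rw [PySem.List.slice_to_neg_natCast _ _ (by omega)]
    have t2 : f2.toList = lastg.toList.drop (lastg.toList.length - k) := by
      rw [hf2, show (-1 * (k : Int)) = -(k : Int) by ring]
      simp only [PySem.Str.toList_slice, PySem.Chars.slice_eq_listSlice]
      rw [PySem.List.slice_from_neg_natCast _ _ (by omega)]
    have t3 : f3.toList = group.toList.take k := by
      rw [hf3]
      simp only [PySem.Str.toList_slice, PySem.Chars.slice_eq_listSlice]
      rw [PySem.List.slice_to_natCast]
    have t4 : f4.toList = group.toList.drop k := by
      rw [hf4]
      simp only [PySem.Str.toList_slice, PySem.Chars.slice_eq_listSlice]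
      rw [PySem.List.slice_from_natCast]
    have hf32 : f3 = f2 := by
      rw [← String.toList_inj, t3, t2, heq]
    have hne2 : f2 ≠ "" := by
      rw [ne_empty_iff_toList, t2]
      intro hcon
      have hc2 := congrArg List.length hcon
      simp only [List.length_drop, List.length_nil] at hc2
      omega
    -- B's slice bounds denote the same slices
    have hcast : ((PySem.Str.len lastg) - ((k : Nat) : Int)) = ((lastg.toList.length - k : Nat) : Int) := by
      rw [pvStrLen_eq]; omega
    have hhead : PySem.Str.slice lastg none (some ((PySem.Str.len lastg) - ((k : Nat) : Int))) = f1 := by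
      rw [← String.toList_inj, t1, hcast]
      simp only [PySem.Str.toList_slice, PySem.Chars.slice_eq_listSlice]
      rw [PySem.List.slice_to_natCast]
    have hov : PySem.Str.slice lastg (some ((PySem.Str.len lastg) - ((k : Nat) : Int))) none = f2 := by
      rw [← String.toList_inj, t2, hcast]
      simp only [PySem.Str.toList_slice, PySem.Chars.slice_eq_listSlice]
      rw [PySem.List.slice_from_natCast]
    -- no separator in the pieces that can become last_group
    have hs2 : '\x00' ∉ f2.toList := by
      rw [t2]
      intro hmem
      exact hl (List.mem_of_mem_drop hmem)
    have hs4 : '\x00' ∉ f4.toList := by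
      rw [t4]
      intro hmem
      exact hg (List.mem_of_mem_drop hmem)
    have hBv : fragStepB (out, lastg) group =
        (let o1 := if f1 ≠ "" then out ++ [f1] else out
         if f4 ≠ "" then ((o1 ++ [f2]) ++ [f2], f4) else (o1 ++ [f2], f2)) := by
      simp only [fragStepB]
      rw [hovB, if_neg hk0, hhead, hov]
    have hAv : fragStepA (out, lastg) group =
        (match PySem.List.pop? ([f1, f2, f2, f4].filter (fun g => g ≠ "")) (-1) with
          | some (last, rest) => (out ++ rest, last)
          | none => (out, lastg)) := by
      simp only [fragStepA]
      rw [hovA, if_pos hkz, ← hf1, ← hf2, ← hf3, ← hf4, hf32]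
    by_cases h1 : f1 = "" <;> by_cases h4 : f4 = ""
    · -- f1 = "", f4 = ""
      have hfil : [f1, f2, f2, f4].filter (fun g => g ≠ "") = [f2] ++ [f2] := by
        simp [h1, h4, hne2]
      rw [hAv, hfil, PySem.List.pop?_last, hBv]
      refine ⟨?_, ?_⟩
      · simp [h1, h4]
      · simpa [h1, h4] using hs2
    · have hfil : [f1, f2, f2, f4].filter (fun g => g ≠ "") = [f2, f2] ++ [f4] := by
        simp [h1, h4, hne2]
      rw [hAv, hfil, PySem.List.pop?_last, hBv]
      refine ⟨?_, ?_⟩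
      · simp [h1, h4]
      · simpa [h1, h4] using hs4
    · have hfil : [f1, f2, f2, f4].filter (fun g => g ≠ "") = [f1, f2] ++ [f2] := by
        simp [h1, h4, hne2]
      rw [hAv, hfil, PySem.List.pop?_last, hBv]
      refine ⟨?_, ?_⟩
      · simp [h1, h4]
      · simpa [h1, h4] using hs2
    · have hfil : [f1, f2, f2, f4].filter (fun g => g ≠ "") = [f1, f2, f2] ++ [f4] := by
        simp [h1, h4, hne2]
      rw [hAv, hfil, PySem.List.pop?_last, hBv]
      refine ⟨?_, ?_⟩
      · simp [h1, h4]
      · simpa [h1, h4] using hs4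

lemma fold_eq : ∀ (rest : List String) (out : List String) (lastg : String),
    (∀ g ∈ rest, '\x00' ∉ g.toList) → '\x00' ∉ lastg.toList →
    rest.foldl fragStepA (out, lastg) = rest.foldl fragStepB (out, lastg) := by
  intro rest
  induction rest with
  | nil => intro out lastg _ _; rfl
  | cons g rest ih =>
    intro out lastg hrest hlast
    have hg : '\x00' ∉ g.toList := hrest g (by simp)
    have h := fragStep_eq out lastg g hlast hg
    rw [List.foldl_cons, List.foldl_cons, h.1]
    exact ih (fragStepB (out, lastg) g).1 (fragStepB (out, lastg) g).2
      (fun g' hg' => hrest g' (by simp [hg'])) h.2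

lemma noSep_of_dom (g : String) (h : pvDomStr g = true) : '\x00' ∉ g.toList := by
  intro hc
  unfold pvDomStr at h
  have h2 := List.all_eq_true.mp h _ hc
  exact absurd h2 (by decide)

-- ===== VERDICT (by name: the statement is the Claim_ definition above) =====
theorem fragment_spec : Claim_equal_fragment := by
  intro template hdom hpre
  unfold Spec_fragment
  have hall : ∀ g ∈ template, '\x00' ∉ g.toList := by
    intro g hgmem
    exact noSep_of_dom g (List.all_eq_true.mp hdom g hgmem)
  cases template with
  | nil => exact absurd rfl hpre
  | cons g0 rest =>
    simp only [fragment, fragment_alt]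
    rw [fold_eq rest [] g0 (fun g hg => hall g (by simp [hg])) (hall g0 (by simp))]
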